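-- pv_equiv track=rewrite | github.com/amararora07/CodeFights | areEquallyStrong.py | areEquallyStrong
-- ===== SOURCE A (Python) =====
-- def areEquallyStrong(yourLeft, yourRight, friendsLeft, friendsRight):
--     a=[yourLeft, yourRight]
--     b=[friendsLeft, friendsRight]
--     a.sort()
--     b.sort()
--     for i in range(len(a)):
--         if a[i]!=b[i]:
--             return False
--     return True
-- ===== SOURCE B (Python) =====
-- def areEquallyStrong(yourLeft, yourRight, friendsLeft, friendsRight):
--     # Multiset equality of two pairs via an arithmetic invariant:
--     # total strength must agree, and yourLeft must match one friend's hand;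
--     # the remaining hand then matches automatically by subtraction.
--     if yourLeft + yourRight != friendsLeft + friendsRight:
--         return False
--     return yourLeft == friendsLeft or yourLeft == friendsRight
-- ===== Notes on version B (the rewrite author's own statement) =====
-- stated objective: alternative
-- what changed: Replaced sorting both pairs and looping over indices with an arithmetic invariant test: the sums must agree and yourLeft must match one of the friend's hands (the other hand then matches by subtraction).
import Mathlib
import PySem

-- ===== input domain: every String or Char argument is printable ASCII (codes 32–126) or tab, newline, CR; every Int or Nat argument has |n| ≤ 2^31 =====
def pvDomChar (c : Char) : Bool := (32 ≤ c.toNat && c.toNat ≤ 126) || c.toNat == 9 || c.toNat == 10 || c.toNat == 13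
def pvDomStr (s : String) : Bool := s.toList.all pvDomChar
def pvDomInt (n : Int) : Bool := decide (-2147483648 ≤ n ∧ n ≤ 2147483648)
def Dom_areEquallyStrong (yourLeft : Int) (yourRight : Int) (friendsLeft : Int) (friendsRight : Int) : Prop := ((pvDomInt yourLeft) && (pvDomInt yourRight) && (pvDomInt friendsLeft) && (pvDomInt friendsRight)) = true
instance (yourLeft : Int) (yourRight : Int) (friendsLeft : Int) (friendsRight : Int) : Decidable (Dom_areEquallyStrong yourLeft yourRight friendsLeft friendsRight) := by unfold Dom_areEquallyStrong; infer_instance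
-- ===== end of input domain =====

-- B replaces A's sort-the-pairs-and-index-loop with an arithmetic invariant test
-- (equal sums plus one matching hand) — an alternative of the same cost.

-- ===== PORT A =====
-- loop body of A: for i in range(len(a)): if a[i]!=b[i]: return False; then return True
def areEquallyStrongLoop (a b : List Int) : List Int → Bool
  | [] => true
  | i :: rest =>
    if PySem.List.pyGet? a i ≠ PySem.List.pyGet? b i then false
    else areEquallyStrongLoop a b rest

def areEquallyStrong (yourLeft : Int) (yourRight : Int) (friendsLeft : Int) (friendsRight : Int) : Bool :=
  let a := PySem.List.sorted [yourLeft, yourRight] (fun x => x) false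
  let b := PySem.List.sorted [friendsLeft, friendsRight] (fun x => x) false
  areEquallyStrongLoop a b (PySem.List.pyRange 0 (a.length : Int) 1)

-- ===== PORT B =====
def areEquallyStrong_alt (yourLeft : Int) (yourRight : Int) (friendsLeft : Int) (friendsRight : Int) : Bool :=
  if yourLeft + yourRight ≠ friendsLeft + friendsRight then false
  else (yourLeft == friendsLeft) || (yourLeft == friendsRight)

-- ===== PRECONDITION & SPEC =====
def Spec_areEquallyStrong (yourLeft : Int) (yourRight : Int) (friendsLeft : Int) (friendsRight : Int) (out : Bool) : Prop := out = areEquallyStrong_alt yourLeft yourRight friendsLeft friendsRight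
instance (yourLeft : Int) (yourRight : Int) (friendsLeft : Int) (friendsRight : Int) (out : Bool) : Decidable (Spec_areEquallyStrong yourLeft yourRight friendsLeft friendsRight out) := by unfold Spec_areEquallyStrong; infer_instance

-- ===== CLAIM =====
def Claim_equal_areEquallyStrong : Prop := ∀ (yourLeft : Int) (yourRight : Int) (friendsLeft : Int) (friendsRight : Int), Dom_areEquallyStrong yourLeft yourRight friendsLeft friendsRight → Spec_areEquallyStrong yourLeft yourRight friendsLeft friendsRight (areEquallyStrong yourLeft yourRight friendsLeft friendsRight)

-- ===== LEMMAS AND PROOFS =====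
-- sorted of a two-element list, by naming the order
theorem sorted_pair (x y : Int) :
    PySem.List.sorted [x, y] (fun v => v) false = if x ≤ y then [x, y] else [y, x] := by
  split_ifs with h
  · exact PySem.List.sorted_id_eq_of_perm_of_pairwise [x, y] [x, y] (List.Perm.refl _) (by simp [h])
  · exact PySem.List.sorted_id_eq_of_perm_of_pairwise [x, y] [y, x] (List.Perm.swap _ _ _) (by simp; omega)

theorem range01 : PySem.List.pyRange 0 2 1 = [0, 1] := by decide

theorem loop_pair (a b c d : Int) :
    areEquallyStrongLoop [a, b] [c, d] [0, 1] = ((a == c) && (b == d)) := by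
  simp [areEquallyStrongLoop, PySem.List.pyGet?, PySem.List.pyIdx?]
  by_cases h1 : a = c <;> by_cases h2 : b = d <;> simp [h1, h2]

-- ===== VERDICT =====
theorem areEquallyStrong_spec : Claim_equal_areEquallyStrong := by
  intro yl yr fl fr _
  unfold Spec_areEquallyStrong areEquallyStrong areEquallyStrong_alt
  rw [sorted_pair, sorted_pair]
  split_ifs with h1 h2 h3 h3 h3 h3 <;>
    · show areEquallyStrongLoop _ _ (PySem.List.pyRange 0 2 1) = _
      rw [range01, loop_pair, Bool.eq_iff_iff]
      simp only [Bool.and_eq_true, Bool.or_eq_true, beq_iff_eq, Bool.false_eq_true, iff_false,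
        not_and]
      omega
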